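-- pv_equiv track=rewrite | github.com/michaelhball/hanga | hanga/util/prompt.py | construct_prompts
-- ===== SOURCE A (Python) =====
-- from typing import List, Optional, Union
--
-- def construct_prompts(
--     prompts: Union[str, List[str]],
--     prefixes: Optional[List[str]] = None,
--     suffixes: Optional[List[str]] = None,
-- ):
--     """"""
--
--     if isinstance(prompts, str):
--         prompts = [prompts]
--     prefixes = prefixes or []
--     suffixes = suffixes or []
--
--     _prompts = []
--     for prompt in prompts:
--         if len(prefixes) == 0 and len(suffixes) == 0:
--             _prompts.append(prompt)
--         elif len(prefixes) != 0 and len(suffixes) != 0: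
--             for prefix in prefixes:
--                 for suffix in suffixes:
--                     _prompts.append(f"{prefix} {prompt} {suffix}")
--         elif len(prefixes) != 0:
--             for prefix in prefixes:
--                 _prompts.append(f"{prefix} {prompt}")
--         else:
--             for suffix in suffixes:
--                 _prompts.append(f"{prompt} {suffix}")
--
--     return _prompts
-- ===== SOURCE B (Python) =====
-- def construct_prompts(prompts, prefixes=None, suffixes=None):
--     """Staged pipeline: the result list is built in two successive expansion
--     passes (prefix pass, then suffix pass) instead of one branched nested loop."""
--     if isinstance(prompts, str):
--         prompts = [prompts]
--     out = list(prompts)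
--     if prefixes:
--         out = [f"{prefix} {p}" for p in out for prefix in prefixes]
--     if suffixes:
--         out = [f"{p} {suffix}" for p in out for suffix in suffixes]
--     return out
-- ===== Notes on version B (the rewrite author's own statement) =====
-- stated objective: simpler
-- what changed: A's single loop with four emptiness branches and nested inner loops is replaced by a staged pipeline: one pass that expands the prompt list by prefixes (if any), then a second pass that expands the result by suffixes (if any).
import Mathlib
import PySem

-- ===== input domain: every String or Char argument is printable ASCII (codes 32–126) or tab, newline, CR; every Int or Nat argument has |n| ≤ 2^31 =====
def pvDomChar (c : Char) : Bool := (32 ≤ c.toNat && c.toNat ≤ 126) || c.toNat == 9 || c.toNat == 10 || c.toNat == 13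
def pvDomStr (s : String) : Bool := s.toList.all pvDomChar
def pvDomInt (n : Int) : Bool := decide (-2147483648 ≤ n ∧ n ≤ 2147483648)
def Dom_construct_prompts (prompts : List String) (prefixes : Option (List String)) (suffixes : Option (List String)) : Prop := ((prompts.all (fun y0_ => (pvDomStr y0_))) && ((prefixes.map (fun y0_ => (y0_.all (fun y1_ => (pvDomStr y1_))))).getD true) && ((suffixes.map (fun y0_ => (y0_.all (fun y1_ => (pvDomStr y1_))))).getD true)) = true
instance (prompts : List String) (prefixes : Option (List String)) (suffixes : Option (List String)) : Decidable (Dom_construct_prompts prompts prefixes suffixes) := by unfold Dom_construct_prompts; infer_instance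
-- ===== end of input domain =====

-- B replaces A's four-way branched nested loop by a staged pipeline: a prefix
-- expansion pass followed by a suffix expansion pass (objective: simpler).

-- ===== PORT A =====
-- literal port: `prefixes or []` / `suffixes or []`, then the four-branch loop;
-- each f-string is ported as concatenation of its parts with single spaces.
def construct_prompts (prompts : List String) (prefixes : Option (List String)) (suffixes : Option (List String)) : List String :=
  let pre := prefixes.getD []
  let suf := suffixes.getD []
  prompts.foldl (fun acc prompt =>
    if pre.length = 0 ∧ suf.length = 0 then
      acc ++ [prompt]
    else if pre.length ≠ 0 ∧ suf.length ≠ 0 then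
      pre.foldl (fun acc2 pfx =>
        suf.foldl (fun acc3 sfx =>
          acc3 ++ [pfx ++ " " ++ prompt ++ " " ++ sfx]) acc2) acc
    else if pre.length ≠ 0 then
      pre.foldl (fun acc2 pfx =>
        acc2 ++ [pfx ++ " " ++ prompt]) acc
    else
      suf.foldl (fun acc2 sfx =>
        acc2 ++ [prompt ++ " " ++ sfx]) acc) []

-- ===== PORT B =====
-- staged pipeline: `if prefixes:` (truthy = present and nonempty) expands the
-- list by prefixes, then `if suffixes:` expands the result by suffixes.
def construct_prompts_alt (prompts : List String) (prefixes : Option (List String)) (suffixes : Option (List String)) : List String :=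
  let out0 := prompts
  let out1 :=
    if prefixes.getD [] = [] then out0
    else out0.flatMap (fun p => (prefixes.getD []).map (fun pfx => pfx ++ " " ++ p))
  if suffixes.getD [] = [] then out1
  else out1.flatMap (fun p => (suffixes.getD []).map (fun sfx => p ++ " " ++ sfx))

-- ===== PRECONDITION & SPEC =====
def Spec_construct_prompts (prompts : List String) (prefixes : Option (List String)) (suffixes : Option (List String)) (out : List String) : Prop := out = construct_prompts_alt prompts prefixes suffixes
instance (prompts : List String) (prefixes : Option (List String)) (suffixes : Option (List String)) (out : List String) : Decidable (Spec_construct_prompts prompts prefixes suffixes out) := by unfold Spec_construct_prompts; infer_instance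

-- ===== CLAIM (what is proved, stated in full; the proofs are below) =====
def Claim_equal_construct_prompts : Prop := ∀ (prompts : List String) (prefixes : Option (List String)) (suffixes : Option (List String)), Dom_construct_prompts prompts prefixes suffixes → Spec_construct_prompts prompts prefixes suffixes (construct_prompts prompts prefixes suffixes)

-- ===== LEMMAS AND PROOFS =====

-- what A appends for one prompt, as a flat list
def gA (pre suf : List String) (prompt : String) : List String :=
  if pre.length = 0 ∧ suf.length = 0 then [prompt]
  else if pre.length ≠ 0 ∧ suf.length ≠ 0 then
    pre.flatMap (fun pfx => suf.map (fun sfx => pfx ++ " " ++ prompt ++ " " ++ sfx))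
  else if pre.length ≠ 0 then pre.map (fun pfx => pfx ++ " " ++ prompt)
  else suf.map (fun sfx => prompt ++ " " ++ sfx)

lemma foldl_append_map (l : List String) (f : String → String) (acc : List String) :
    l.foldl (fun a x => a ++ [f x]) acc = acc ++ l.map f := by
  induction l generalizing acc with
  | nil => simp
  | cons x t ih => simp [ih]

lemma inner_fold (suf : List String) (pfx prompt : String) (acc : List String) :
    suf.foldl (fun a sfx => a ++ [pfx ++ " " ++ prompt ++ " " ++ sfx]) acc
      = acc ++ suf.map (fun sfx => pfx ++ " " ++ prompt ++ " " ++ sfx) :=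
  foldl_append_map suf _ acc

lemma outer_fold (pre suf : List String) (prompt : String) (acc : List String) :
    pre.foldl (fun a2 pfx =>
      suf.foldl (fun a3 sfx => a3 ++ [pfx ++ " " ++ prompt ++ " " ++ sfx]) a2) acc
      = acc ++ pre.flatMap (fun pfx => suf.map (fun sfx => pfx ++ " " ++ prompt ++ " " ++ sfx)) := by
  induction pre generalizing acc with
  | nil => simp
  | cons p t ih =>
      rw [List.foldl_cons, inner_fold, ih, List.flatMap_cons, List.append_assoc]

lemma body_eq (pre suf : List String) (acc : List String) (prompt : String) :
    (if pre.length = 0 ∧ suf.length = 0 then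
      acc ++ [prompt]
    else if pre.length ≠ 0 ∧ suf.length ≠ 0 then
      pre.foldl (fun acc2 pfx =>
        suf.foldl (fun acc3 sfx => acc3 ++ [pfx ++ " " ++ prompt ++ " " ++ sfx]) acc2) acc
    else if pre.length ≠ 0 then
      pre.foldl (fun acc2 pfx => acc2 ++ [pfx ++ " " ++ prompt]) acc
    else
      suf.foldl (fun acc2 sfx => acc2 ++ [prompt ++ " " ++ sfx]) acc)
    = acc ++ gA pre suf prompt := by
  unfold gA
  split_ifs <;> first
    | rfl
    | rw [outer_fold]
    | rw [foldl_append_map]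

lemma a_flatMap (prompts : List String) (pre suf : List String) (acc : List String) :
    (prompts.foldl (fun acc prompt =>
      if pre.length = 0 ∧ suf.length = 0 then
        acc ++ [prompt]
      else if pre.length ≠ 0 ∧ suf.length ≠ 0 then
        pre.foldl (fun acc2 pfx =>
          suf.foldl (fun acc3 sfx => acc3 ++ [pfx ++ " " ++ prompt ++ " " ++ sfx]) acc2) acc
      else if pre.length ≠ 0 then
        pre.foldl (fun acc2 pfx => acc2 ++ [pfx ++ " " ++ prompt]) acc
      else
        suf.foldl (fun acc2 sfx => acc2 ++ [prompt ++ " " ++ sfx]) acc) acc)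
    = acc ++ prompts.flatMap (gA pre suf) := by
  induction prompts generalizing acc with
  | nil => simp
  | cons q t ih => rw [List.foldl_cons, body_eq pre suf acc q, ih]; simp

lemma gA_none (prompt : String) : gA [] [] prompt = [prompt] := by simp [gA]

lemma gA_pre (p : String) (pt : List String) (prompt : String) :
    gA (p :: pt) [] prompt = (p :: pt).map (fun pfx => pfx ++ " " ++ prompt) := by
  simp [gA]

lemma gA_suf (s : String) (st : List String) (prompt : String) :
    gA [] (s :: st) prompt = (s :: st).map (fun sfx => prompt ++ " " ++ sfx) := by
  simp [gA]

lemma gA_both (p : String) (pt : List String) (s : String) (st : List String) (prompt : String) :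
    gA (p :: pt) (s :: st) prompt
      = (p :: pt).flatMap (fun pfx => (s :: st).map (fun sfx => pfx ++ " " ++ prompt ++ " " ++ sfx)) := by
  simp [gA]

lemma flatMap_id (l : List String) : l.flatMap (fun x => [x]) = l := by
  induction l with
  | nil => rfl
  | cons x t ih => rw [List.flatMap_cons, ih]; rfl

-- ===== VERDICT (by name: the statement is the Claim_ definition above) =====
theorem construct_prompts_spec : Claim_equal_construct_prompts := by
  intro prompts prefixes suffixes _
  unfold Spec_construct_prompts construct_prompts construct_prompts_alt
  rw [a_flatMap prompts (prefixes.getD []) (suffixes.getD []) [], List.nil_append]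
  rcases hp : prefixes.getD [] with _ | ⟨p, pt⟩ <;>
  rcases hs : suffixes.getD [] with _ | ⟨s, st⟩
  · rw [if_pos rfl, if_pos rfl]
    rw [show gA [] [] = fun x => [x] from funext gA_none, flatMap_id]
  · rw [if_neg (List.cons_ne_nil s st), if_pos rfl,
      show gA [] (s :: st) = fun prompt => (s :: st).map (fun sfx => prompt ++ " " ++ sfx)
        from funext (gA_suf s st)]
  · rw [if_pos rfl, if_neg (List.cons_ne_nil p pt),
      show gA (p :: pt) [] = fun prompt => (p :: pt).map (fun pfx => pfx ++ " " ++ prompt)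
        from funext (gA_pre p pt)]
  · rw [if_neg (List.cons_ne_nil s st), if_neg (List.cons_ne_nil p pt),
      show gA (p :: pt) (s :: st)
          = fun prompt => (p :: pt).flatMap (fun pfx => (s :: st).map (fun sfx => pfx ++ " " ++ prompt ++ " " ++ sfx))
        from funext (gA_both p pt s st)]
    rw [List.flatMap_assoc]
    refine List.flatMap_congr (fun q _ => ?_)
    rw [List.flatMap_map]
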